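-- pv_equiv track=rewrite | github.com/Yseitaro/BL_irregular | bottom_left_fill.py | getBottomLeft
-- ===== SOURCE A (Python) =====
-- def getBottomLeft(poly):
--     bl=[]
--     _min=999999
--
--     for i,pt in enumerate(poly):
--         pt_object={
--                 "index":i,
--                 "x":pt[0],
--                 "y":pt[1]
--         }
--         target = pt[1]
--
--         if target < _min:
--             _min = target
--             bl = [pt_object]
--         elif target == _min:
--             bl.append(pt_object)
--
--     if len(bl) == 1:
--         return bl[0]["index"]
--
--     else:
--         target = "x"
--         _min = bl[0][target]
--         one_pt = bl[0]
--         for pt_index in range(1, len(bl)):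
--             if bl[pt_index][target] < _min:
--                 one_pt = bl[pt_index]
--                 _min = one_pt["x"]
--         return one_pt["index"]
-- ===== SOURCE B (Python) =====
-- def getBottomLeft(poly):
--     # single pass: running lexicographic minimum of (y, x), earliest index wins ties
--     best_y, best_x, best_i = poly[0][1], poly[0][0], 0
--     for i, (x, y) in enumerate(poly):
--         if y < best_y or (y == best_y and x < best_x):
--             best_y, best_x, best_i = y, x, i
--     return best_i
-- ===== Notes on version B (the rewrite author's own statement) =====
-- stated objective: simpler
-- what changed: Replaces A's two-phase algorithm (collect all min-y points into a list, then rescan that list for min x) by one single-pass running lexicographic minimum of (y, x) with earliest-index tie-breaking, eliminating the intermediate list and the 999999 sentinel.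
-- crash fix: A raises IndexError on the empty list and, due to its _min=999999 sentinel, on any non-empty polygon in which every point's y-coordinate exceeds 999999 (bl stays empty so bl[0] fails); B raises IndexError only on the empty list and returns the correct bottom-left index on the all-y>999999 inputs. — e.g. on getBottomLeft([(5, 1000000), (3, 1000000)]): A raises IndexError, B returns 1
import Mathlib
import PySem

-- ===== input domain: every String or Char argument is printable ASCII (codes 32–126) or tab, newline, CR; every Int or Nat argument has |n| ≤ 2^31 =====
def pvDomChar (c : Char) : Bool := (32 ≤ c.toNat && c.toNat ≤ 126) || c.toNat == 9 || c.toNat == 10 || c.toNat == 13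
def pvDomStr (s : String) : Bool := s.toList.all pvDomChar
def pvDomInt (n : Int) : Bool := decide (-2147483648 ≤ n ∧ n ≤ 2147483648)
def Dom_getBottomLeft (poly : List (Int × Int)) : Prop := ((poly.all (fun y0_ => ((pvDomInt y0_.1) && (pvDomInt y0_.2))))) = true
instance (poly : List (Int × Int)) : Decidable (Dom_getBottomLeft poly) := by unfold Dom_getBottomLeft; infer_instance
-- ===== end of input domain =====

-- B replaces A's collect-min-y-list-then-rescan-for-min-x by one running lexicographic minimum (simpler, same cost).

-- ===== PORT A =====
-- first loop of A: 'for i,pt in enumerate(poly)'; pt_object {index,x,y} is the triple (index, x, y);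
-- state is (_min, bl)
def aLoop1 (ps : List (Int × Int)) (i : Int) (m : Int) (bl : List (Int × Int × Int)) :
    Int × List (Int × Int × Int) :=
  match ps with
  | [] => (m, bl)
  | (x, y) :: rest =>
    if y < m then aLoop1 rest (i + 1) y [(i, x, y)]
    else if y == m then aLoop1 rest (i + 1) m (bl ++ [(i, x, y)])
    else aLoop1 rest (i + 1) m bl

-- second loop of A: 'for pt_index in range(1, len(bl))' = walk over bl.tail; state is (one_pt, _min)
def aLoop2 (bs : List (Int × Int × Int)) (one : Int × Int × Int) (m : Int) : Int × Int × Int :=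
  match bs with
  | [] => one
  | b :: rest => if b.2.1 < m then aLoop2 rest b b.2.1 else aLoop2 rest one m

-- A's tail after the first loop: 'if len(bl)==1: return bl[0]["index"] else: <second loop on bl>'
-- bl[0] on empty bl is an IndexError in Python: Pre_ excludes that case; the [] arm's 0 is unreachable under Pre_.
def aFinish (s : Int × List (Int × Int × Int)) : Int :=
  match s.2 with
  | [] => 0
  | [b] => b.1
  | b0 :: bs => (aLoop2 bs b0 b0.2.1).1

def getBottomLeft (poly : List (Int × Int)) : Int :=
  aFinish (aLoop1 poly 0 999999 [])

-- ===== PORT B =====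
-- Source B's loop: running best (best_y, best_x, best_i); '(y,x) < (best_y,best_x)' spelled out lexicographically
def bLoop (ps : List (Int × Int)) (i : Int) (best_y best_x best_i : Int) : Int :=
  match ps with
  | [] => best_i
  | (x, y) :: rest =>
    if y < best_y ∨ (y = best_y ∧ x < best_x) then bLoop rest (i + 1) y x i
    else bLoop rest (i + 1) best_y best_x best_i

def getBottomLeft_alt (poly : List (Int × Int)) : Int :=
  match poly with
  | [] => 0  -- poly[0] raises IndexError in Python; excluded by Pre_
  | (x0, y0) :: _ => bLoop poly 0 y0 x0 0

-- ===== PRECONDITION & SPEC =====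
-- Pre_ excludes exactly the inputs on which the Python A raises IndexError: the empty list, and
-- non-empty lists all of whose y-coordinates exceed A's 999999 sentinel (bl stays empty, bl[0] fails).
def Pre_getBottomLeft (poly : List (Int × Int)) : Prop :=
  poly ≠ [] ∧ ∃ p ∈ poly, p.2 ≤ 999999
instance (poly : List (Int × Int)) : Decidable (Pre_getBottomLeft poly) := by
  unfold Pre_getBottomLeft; infer_instance

def pvWitness_getBottomLeft : (List (Int × Int)) := [(0, 0), (1, 0)]

-- A raises IndexError on non-empty polygons whose every y-coordinate exceeds 999999 (and on []);
-- B returns the correct bottom-left index on the former.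
def Raises_getBottomLeft (poly : List (Int × Int)) : Prop :=
  poly ≠ [] ∧ ∀ p ∈ poly, 999999 < p.2
instance (poly : List (Int × Int)) : Decidable (Raises_getBottomLeft poly) := by
  unfold Raises_getBottomLeft; infer_instance
def pvRaiseWitness_getBottomLeft : (List (Int × Int)) := [(5, 1000000), (3, 1000000)]
def pvRaiseWitnessOut_getBottomLeft : Int := 1

def Spec_getBottomLeft (poly : List (Int × Int)) (out : Int) : Prop := out = getBottomLeft_alt poly
instance (poly : List (Int × Int)) (out : Int) : Decidable (Spec_getBottomLeft poly out) := by
  unfold Spec_getBottomLeft; infer_instance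

-- ===== CLAIM (what is proved, stated in full; the proofs are below) =====
def Claim_equal_getBottomLeft : Prop := ∀ (poly : List (Int × Int)), Dom_getBottomLeft poly → Pre_getBottomLeft poly → Spec_getBottomLeft poly (getBottomLeft poly)
def Claim_raises_getBottomLeft : Prop := (∀ (poly : List (Int × Int)), Dom_getBottomLeft poly → Raises_getBottomLeft poly → ¬ Pre_getBottomLeft poly) ∧ (Dom_getBottomLeft (pvRaiseWitness_getBottomLeft) ∧ Raises_getBottomLeft (pvRaiseWitness_getBottomLeft) ∧ getBottomLeft_alt (pvRaiseWitness_getBottomLeft) = pvRaiseWitnessOut_getBottomLeft)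

-- ===== LEMMAS AND PROOFS =====

-- aLoop2's running minimum m equals the x of the current best; appending one element updates by one compare
theorem aLoop2_append (bs : List (Int × Int × Int)) (b one : Int × Int × Int) (m : Int)
    (hm : m = one.2.1) :
    aLoop2 (bs ++ [b]) one m =
      (if b.2.1 < (aLoop2 bs one m).2.1 then b else aLoop2 bs one m) := by
  induction bs generalizing one m with
  | nil => subst hm; simp [aLoop2]
  | cons c rest ih =>
    simp only [List.cons_append, aLoop2]
    by_cases h : c.2.1 < m
    · simp only [if_pos h]; exact ih c c.2.1 rfl
    · simp only [if_neg h]; exact ih one m hm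

-- simulation: A's (first loop + finish) tracks B's running best
theorem sim (ps : List (Int × Int)) (i m : Int) (bl : List (Int × Int × Int))
    (by_ bx bi : Int)
    (h : (∃ b0 bs, bl = b0 :: bs ∧ aLoop2 bs b0 b0.2.1 = (bi, bx, by_) ∧ m = by_)
       ∨ (bl = [] ∧ m = 999999 ∧ 999999 < by_ ∧ ∃ p ∈ ps, p.2 ≤ 999999)) :
    aFinish (aLoop1 ps i m bl) = bLoop ps i by_ bx bi := by
  induction ps generalizing i m bl by_ bx bi with
  | nil =>
    rcases h with ⟨b0, bs, hbl, ho, hm⟩ | ⟨_, _, _, ⟨p, hp, _⟩⟩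
    · subst hbl
      cases bs with
      | nil =>
        simp only [aLoop1, aFinish, bLoop]
        have : b0 = (bi, bx, by_) := ho
        simp [this]
      | cons c cs => simp only [aLoop1, aFinish, bLoop, ho]
    · exact absurd hp (List.not_mem_nil)
  | cons p rest ih =>
    obtain ⟨x, y⟩ := p
    simp only [aLoop1, bLoop]
    rcases h with ⟨b0, bs, hbl, ho, hm⟩ | ⟨hbl, hm, hby, hex⟩
    · subst hbl; subst hm
      by_cases h1 : y < m
      · rw [if_pos h1, if_pos (Or.inl h1)]
        exact ih _ _ _ _ _ _ (Or.inl ⟨(i, x, y), [], rfl, rfl, rfl⟩)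
      · rw [if_neg h1]
        by_cases h2 : y = m
        · rw [if_pos (beq_iff_eq.mpr h2)]
          by_cases h3 : x < bx
          · rw [if_pos (Or.inr ⟨h2, h3⟩)]
            refine ih _ _ _ _ _ _ (Or.inl ⟨b0, bs ++ [(i, x, y)], rfl, ?_, h2.symm⟩)
            rw [aLoop2_append bs (i, x, y) b0 b0.2.1 rfl, ho]
            simp only [if_pos (show ((i, x, y) : Int × Int × Int).2.1 < ((bi, bx, m) : Int × Int × Int).2.1 from h3)]
          · have hnc : ¬ (y < m ∨ (y = m ∧ x < bx)) := by omega
            rw [if_neg hnc]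
            refine ih _ _ _ _ _ _ (Or.inl ⟨b0, bs ++ [(i, x, y)], rfl, ?_, rfl⟩)
            rw [aLoop2_append bs (i, x, y) b0 b0.2.1 rfl, ho]
            simp only [if_neg (show ¬ ((i, x, y) : Int × Int × Int).2.1 < ((bi, bx, m) : Int × Int × Int).2.1 from h3)]
        · rw [if_neg (by simpa using h2)]
          have hnc : ¬ (y < m ∨ (y = m ∧ x < bx)) := by omega
          rw [if_neg hnc]
          exact ih _ _ _ _ _ _ (Or.inl ⟨b0, bs, rfl, ho, rfl⟩)
    · subst hbl; subst hm
      by_cases h1 : y < 999999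
      · rw [if_pos h1, if_pos (Or.inl (by omega))]
        exact ih _ _ _ _ _ _ (Or.inl ⟨(i, x, y), [], rfl, rfl, rfl⟩)
      · rw [if_neg h1]
        by_cases h2 : y = (999999 : Int)
        · rw [if_pos (beq_iff_eq.mpr h2), if_pos (Or.inl (by omega))]
          exact ih _ _ _ _ _ _ (Or.inl ⟨(i, x, y), [], rfl, rfl, h2.symm⟩)
        · rw [if_neg (by simpa using h2)]
          have hrest : ∃ p ∈ rest, p.2 ≤ 999999 := by
            rcases hex with ⟨q, hq, hqy⟩
            rcases List.mem_cons.mp hq with hq | hq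
            · subst hq; simp at hqy; omega
            · exact ⟨q, hq, hqy⟩
          by_cases h3 : y < by_ ∨ (y = by_ ∧ x < bx)
          · rw [if_pos h3]
            exact ih _ _ _ _ _ _ (Or.inr ⟨rfl, rfl, by omega, hrest⟩)
          · rw [if_neg h3]
            exact ih _ _ _ _ _ _ (Or.inr ⟨rfl, rfl, hby, hrest⟩)

-- ===== VERDICT (by name: the statement is the Claim_ definition above) =====
theorem getBottomLeft_spec : Claim_equal_getBottomLeft := by
  intro poly _ hpre
  obtain ⟨hne, hex⟩ := hpre
  unfold Spec_getBottomLeft getBottomLeft getBottomLeft_alt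
  cases poly with
  | nil => exact absurd rfl hne
  | cons p rest =>
    obtain ⟨x0, y0⟩ := p
    simp only [aLoop1, bLoop]
    rw [if_neg (show ¬ (y0 < y0 ∨ True ∧ x0 < x0) by simp)]
    by_cases h1 : y0 < 999999
    · rw [if_pos h1]
      exact sim rest 1 y0 [(0, x0, y0)] y0 x0 0 (Or.inl ⟨(0, x0, y0), [], rfl, rfl, rfl⟩)
    · rw [if_neg h1]
      by_cases h2 : y0 = (999999 : Int)
      · rw [if_pos (beq_iff_eq.mpr h2)]
        exact sim rest 1 999999 [(0, x0, y0)] y0 x0 0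
          (Or.inl ⟨(0, x0, y0), [], rfl, rfl, h2.symm⟩)
      · rw [if_neg (by simpa using h2)]
        have hrest : ∃ p ∈ rest, p.2 ≤ 999999 := by
          rcases hex with ⟨q, hq, hqy⟩
          rcases List.mem_cons.mp hq with hq | hq
          · subst hq; simp at hqy; omega
          · exact ⟨q, hq, hqy⟩
        exact sim rest 1 999999 [] y0 x0 0 (Or.inr ⟨rfl, rfl, by omega, hrest⟩)

@[simp] theorem getBottomLeft_raises : Claim_raises_getBottomLeft := by
  unfold Claim_raises_getBottomLeft
  refine ⟨?_, by decide⟩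
  rintro poly _ ⟨hne, hall⟩ ⟨_, q, hq, hqy⟩
  exact absurd (hall q hq) (by omega)
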